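-- pv_equiv track=rewrite | github.com/tomduval176/internship-HCI | menu_adapt/utility.py | get_header_indexes
-- ===== SOURCE A (Python) =====
-- def get_header_indexes(menu):
--         header_indexes = []
--         separator = "----"
--         groupboundary = False
--         for i in range(0, len(menu)):
--             if i == 0 or menu[i] == separator:
--                 groupboundary = True # Found a group start indicator
--             if groupboundary and menu[i] != separator:
--                 header_indexes += [i] # First item of group (header)
--                 groupboundary = False
--         return header_indexes
-- ===== SOURCE B (Python) =====
-- def get_header_indexes(menu):
--     # Run-skipping: skip separators to find a group's start, record it,
--     # then skip the whole non-separator run; no per-element predicate or flag.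
--     out = []
--     n = len(menu)
--     i = 0
--     while i < n:
--         if menu[i] == "----":
--             i += 1
--         else:
--             out.append(i)
--             i += 1
--             while i < n and menu[i] != "----":
--                 i += 1
--     return out
-- ===== Notes on version B (the rewrite author's own statement) =====
-- stated objective: alternative
-- what changed: A's single pass with a carried boolean flag is replaced by a run-skipping two-level loop: skip separators, record the start index of each maximal non-separator run (the header), then skip the rest of that run; headers are exactly the run starts, so no per-element flag or look-back predicate exists in B.
import Mathlib
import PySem

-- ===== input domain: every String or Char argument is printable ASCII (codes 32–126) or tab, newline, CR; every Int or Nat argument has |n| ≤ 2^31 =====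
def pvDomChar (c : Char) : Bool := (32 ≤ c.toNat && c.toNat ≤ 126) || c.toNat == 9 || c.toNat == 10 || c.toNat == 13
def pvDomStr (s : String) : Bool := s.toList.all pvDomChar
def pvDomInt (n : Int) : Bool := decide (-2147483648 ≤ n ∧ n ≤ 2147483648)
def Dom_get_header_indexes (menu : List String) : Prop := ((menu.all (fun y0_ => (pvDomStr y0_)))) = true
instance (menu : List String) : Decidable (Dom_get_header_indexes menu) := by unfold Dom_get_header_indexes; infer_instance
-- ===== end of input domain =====

-- B replaces A's flag-carrying scan by a run-skipping two-level loop (headers = starts of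
-- maximal non-separator runs); objective: alternative decomposition, same O(n) cost.

-- ===== PORT A =====
-- A: loop over range(len(menu)) carrying (header_indexes, groupboundary)
def get_header_indexes (menu : List String) : List Int :=
  ((List.range menu.length).foldl (fun (st : List Int × Bool) i =>
    let gb := if i = 0 ∨ menu.getD i "" = "----" then true else st.2
    if gb ∧ menu.getD i "" ≠ "----" then (st.1 ++ [(i : Int)], false) else (st.1, gb))
    ([], false)).1

-- ===== PORT B =====
-- B's inner while loop: advance i past the current non-separator run
def pvSkipRun (menu : List String) (i : Nat) : Nat :=
  if i < menu.length then
    (if menu.getD i "" ≠ "----" then pvSkipRun menu (i + 1) else i)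
  else i
termination_by menu.length - i

-- needed by the outer loop's termination
theorem pvSkipRun_le (menu : List String) (i : Nat) : i ≤ pvSkipRun menu i := by
  fun_induction pvSkipRun menu i <;> omega

-- B's outer while loop: skip a separator, or record a run start and skip the run
def pvOuter (menu : List String) (i : Nat) : List Int :=
  if h : i < menu.length then
    (if menu.getD i "" = "----" then pvOuter menu (i + 1)
     else (i : Int) :: pvOuter menu (pvSkipRun menu (i + 1)))
  else []
termination_by menu.length - i
decreasing_by
  · omega
  · have := pvSkipRun_le menu (i + 1); omega

def get_header_indexes_alt (menu : List String) : List Int := pvOuter menu 0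

-- ===== PRECONDITION & SPEC =====
def Spec_get_header_indexes (menu : List String) (out : List Int) : Prop := out = get_header_indexes_alt menu
instance (menu : List String) (out : List Int) : Decidable (Spec_get_header_indexes menu out) := by unfold Spec_get_header_indexes; infer_instance

-- ===== CLAIM (what is proved, stated in full; the proofs are below) =====
def Claim_equal_get_header_indexes : Prop := ∀ (menu : List String), Dom_get_header_indexes menu → Spec_get_header_indexes menu (get_header_indexes menu)

-- ===== LEMMAS AND PROOFS =====

-- A's loop body
def pvStepA (menu : List String) (st : List Int × Bool) (i : Nat) : List Int × Bool :=
  let gb := if i = 0 ∨ menu.getD i "" = "----" then true else st.2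
  if gb ∧ menu.getD i "" ≠ "----" then (st.1 ++ [(i : Int)], false) else (st.1, gb)

-- A's flag after processing indices 0..n-1 equals "the last processed element is the separator"
def pvFlag (menu : List String) (n : Nat) : Bool :=
  decide (n ≠ 0 ∧ menu.getD (n - 1) "" = "----")

-- the common yardstick: indices j in [i, n) that start a group
def pvTail (menu : List String) (i : Nat) : List Int :=
  ((List.range' i (menu.length - i)).filter (fun j =>
    decide (menu.getD j "" ≠ "----" ∧ (j = 0 ∨ menu.getD (j - 1) "" = "----")))).map
    (fun j => (j : Int))

-- B's output restricted to the first n indices (A-side yardstick)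
def pvFilt (menu : List String) (n : Nat) : List Int :=
  ((List.range n).filter (fun i =>
    decide (menu.getD i "" ≠ "----" ∧ (i = 0 ∨ menu.getD (i - 1) "" = "----")))).map
    (fun i => (i : Int))

theorem pvInvariant (menu : List String) (n : Nat) (acc : List Int) :
    (List.range n).foldl (pvStepA menu) (acc, pvFlag menu 0) =
      (acc ++ pvFilt menu n, pvFlag menu n) := by
  induction n with
  | zero => simp [pvFilt]
  | succ n ih =>
    rw [List.range_succ, List.foldl_append, ih]
    simp only [List.foldl_cons, List.foldl_nil, pvStepA, pvFilt, List.range_succ,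
      List.filter_append, List.filter_cons, List.filter_nil]
    by_cases hs : menu[n]?.getD "" = "----"
    · have h1 : pvFlag menu (n + 1) = true := by simp [pvFlag, List.getD, hs]
      simp [List.getD, hs, h1]
    · have h1 : pvFlag menu (n + 1) = false := by simp [pvFlag, List.getD, hs]
      by_cases h0 : n = 0
      · subst h0; simp [List.getD, hs, pvFlag]
      · by_cases hp : menu[n - 1]?.getD "" = "----"
        · have : pvFlag menu n = true := by simp [pvFlag, List.getD, h0, hp]
          simp [List.getD, hs, h0, hp, h1, this]
        · have : pvFlag menu n = false := by simp [pvFlag, List.getD, h0, hp]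
          simp [List.getD, hs, h0, hp, h1, this]

theorem pvTail_zero (menu : List String) : pvTail menu 0 = pvFilt menu menu.length := by
  simp [pvTail, pvFilt, List.range_eq_range']

theorem pvTail_succ (menu : List String) (i : Nat) (h : i < menu.length) :
    pvTail menu i =
      (if menu.getD i "" ≠ "----" ∧ (i = 0 ∨ menu.getD (i - 1) "" = "----")
       then [(i : Int)] else []) ++ pvTail menu (i + 1) := by
  have hn : menu.length - i = (menu.length - (i + 1)) + 1 := by omega
  by_cases hp : menu.getD i "" ≠ "----" ∧ (i = 0 ∨ menu.getD (i - 1) "" = "----")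
  · rw [pvTail, hn, List.range'_succ, List.filter_cons]
    simp only [List.getD] at hp
    simp [pvTail, hp]
  · rw [pvTail, hn, List.range'_succ, List.filter_cons]
    simp only [List.getD] at hp
    simp only [not_and] at hp
    by_cases hs : menu[i]?.getD "" = "----"
    · simp [pvTail, hs]
    · simp [pvTail, hs, hp (by simpa using hs)]

theorem pvTail_stop (menu : List String) (i : Nat) (h : ¬ i < menu.length) :
    pvTail menu i = [] := by
  have : menu.length - i = 0 := by omega
  simp [pvTail, this]

theorem pvSkip_tail (menu : List String) :
    ∀ (k j : Nat), menu.length - j ≤ k → 0 < j → menu.getD (j - 1) "" ≠ "----" →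
      pvTail menu j = pvTail menu (pvSkipRun menu j) := by
  intro k
  induction k with
  | zero =>
    intro j hk _ _
    rw [pvSkipRun]
    simp only [show ¬ j < menu.length by omega, if_false]
  | succ k ih =>
    intro j hk hj hprev
    rw [pvSkipRun]
    by_cases hlt : j < menu.length
    · rw [if_pos hlt]
      by_cases hne : menu.getD j "" ≠ "----"
      · rw [if_pos hne]
        have h1 : pvTail menu j = pvTail menu (j + 1) := by
          rw [pvTail_succ menu j hlt]
          have hnot : ¬ (menu.getD j "" ≠ "----" ∧ (j = 0 ∨ menu.getD (j - 1) "" = "----")) := by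
            rintro ⟨-, h | h⟩
            · omega
            · exact hprev h
          rw [if_neg hnot]
          simp
        rw [h1]
        exact ih (j + 1) (by omega) (by omega) (by simpa using hne)
      · rw [if_neg hne]
    · rw [if_neg hlt]

theorem pvSkipRun_stop (menu : List String) (j : Nat)
    (h : pvSkipRun menu j < menu.length) : menu.getD (pvSkipRun menu j) "" = "----" := by
  fun_induction pvSkipRun menu j with
  | case1 i hlt hne ih => exact ih h
  | case2 i hlt hne => simpa using hne
  | case3 i hlt => omega

theorem pvOuter_tail (menu : List String) :
    ∀ (k i : Nat), menu.length - i ≤ k →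
      (i = 0 ∨ menu.getD (i - 1) "" = "----" ∨ menu.getD i "" = "----") →
      pvOuter menu i = pvTail menu i := by
  intro k
  induction k with
  | zero =>
    intro i hk _
    rw [pvOuter, pvTail_stop menu i (by omega)]
    simp only [show ¬ i < menu.length by omega, dif_neg, not_false_iff]
  | succ k ih =>
    intro i hk hinv
    rw [pvOuter]
    by_cases hlt : i < menu.length
    · by_cases hsep : menu.getD i "" = "----"
      · rw [dif_pos hlt, if_pos hsep,
          ih (i + 1) (by omega) (Or.inr (Or.inl (by simpa using hsep))),
          pvTail_succ menu i hlt, if_neg (fun h => h.1 hsep)]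
        simp
      · rw [dif_pos hlt, if_neg hsep]
        have hpred : menu.getD i "" ≠ "----" ∧ (i = 0 ∨ menu.getD (i - 1) "" = "----") := by
          refine ⟨hsep, ?_⟩
          rcases hinv with h | h | h
          · exact Or.inl h
          · exact Or.inr h
          · exact absurd h hsep
        rw [pvTail_succ menu i hlt, if_pos hpred,
          pvSkip_tail menu menu.length (i + 1) (by omega) (by omega) (by simpa using hsep)]
        simp only [List.singleton_append, List.cons.injEq, true_and]
        have hsle : i + 1 ≤ pvSkipRun menu (i + 1) := pvSkipRun_le menu (i + 1)
        by_cases hslt : pvSkipRun menu (i + 1) < menu.length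
        · exact ih (pvSkipRun menu (i + 1)) (by omega)
            (Or.inr (Or.inr (pvSkipRun_stop menu (i + 1) hslt)))
        · rw [pvOuter, dif_neg hslt, pvTail_stop menu (pvSkipRun menu (i + 1)) hslt]
    · rw [pvOuter, dif_neg hlt, pvTail_stop menu i hlt]

-- ===== VERDICT (by name: the statement is the Claim_ definition above) =====
theorem get_header_indexes_spec : Claim_equal_get_header_indexes := by
  intro menu _
  show get_header_indexes menu = get_header_indexes_alt menu
  have hA := pvInvariant menu menu.length []
  have hf0 : pvFlag menu 0 = false := by simp [pvFlag]
  unfold get_header_indexes get_header_indexes_alt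
  rw [show (fun (st : List Int × Bool) i =>
    let gb := if i = 0 ∨ menu.getD i "" = "----" then true else st.2
    if gb ∧ menu.getD i "" ≠ "----" then (st.1 ++ [(i : Int)], false) else (st.1, gb)) =
      pvStepA menu from rfl, ← hf0, hA,
    pvOuter_tail menu menu.length 0 (by omega) (Or.inl rfl), pvTail_zero]
  simp
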